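-- pv_equiv track=rewrite | github.com/evedovi/lotofacil | modelo/popularidade.py | extrair_features_dezenas
-- ===== SOURCE A (Python) =====
-- def extrair_features_dezenas(dezenas: list[int]) -> dict:
--     """
--     Extrai features simples de uma combinação de dezenas:
--     - soma
--     - quantidade de pares/ímpares
--     - quantidade de sequências consecutivas
--     """
--     dezenas = sorted(dezenas)
--     soma = sum(dezenas)
--     pares = sum(1 for d in dezenas if d % 2 == 0)
--     impares = len(dezenas) - pares
--     sequencias = sum(
--         1 for i in range(len(dezenas) - 1)
--         if dezenas[i + 1] - dezenas[i] == 1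
--     )
--     return {
--         "soma": soma,
--         "qtd_pares": pares,
--         "qtd_impares": impares,
--         "qtd_sequencias": sequencias,
--     }
-- ===== SOURCE B (Python) =====
-- def extrair_features_dezenas(dezenas: list[int]) -> dict:
--     """Same features without sorting: one pass for sum/parity, a set for runs."""
--     soma = sum(dezenas)
--     pares = sum(1 for d in dezenas if d % 2 == 0)
--     impares = len(dezenas) - pares
--     conjunto = set(dezenas)
--     sequencias = sum(1 for d in conjunto if d + 1 in conjunto)
--     return {
--         "soma": soma,
--         "qtd_pares": pares,
--         "qtd_impares": impares,
--         "qtd_sequencias": sequencias,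
--     }
-- ===== Notes on version B (the rewrite author's own statement) =====
-- stated objective: alternative
-- what changed: B drops the sort entirely: sum and parity are counted in one pass over the unsorted input, and the consecutive-run count is computed from a set as the number of distinct values d with d+1 also present (equal to the sorted-adjacency diff-1 count even with duplicates).
import Mathlib
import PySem

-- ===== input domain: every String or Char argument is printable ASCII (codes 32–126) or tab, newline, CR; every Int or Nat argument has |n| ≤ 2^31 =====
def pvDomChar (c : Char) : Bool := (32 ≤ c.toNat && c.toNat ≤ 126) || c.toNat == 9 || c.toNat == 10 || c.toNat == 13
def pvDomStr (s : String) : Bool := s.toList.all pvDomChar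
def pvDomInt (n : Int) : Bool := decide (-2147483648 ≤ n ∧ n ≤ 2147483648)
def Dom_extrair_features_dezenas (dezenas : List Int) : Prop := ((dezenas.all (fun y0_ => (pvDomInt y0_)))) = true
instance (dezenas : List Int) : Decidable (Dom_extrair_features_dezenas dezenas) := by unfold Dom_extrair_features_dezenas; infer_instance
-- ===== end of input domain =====

-- B avoids A's sort: one pass over the input for sum/parity, and a set for the consecutive-run count (idiomatic alternative).

-- ===== PORT A =====
def extrair_features_dezenas (dezenas : List Int) : List (String × Int) :=
  let dz := PySem.List.sorted dezenas (fun x => x) false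
  let soma := dz.sum
  let pares : Int := dz.foldl (fun acc d => if PySem.Int.mod d 2 = 0 then acc + 1 else acc) 0
  let impares : Int := (dz.length : Int) - pares
  let sequencias : Int :=
    (PySem.List.pyRange 0 ((dz.length : Int) - 1) 1).foldl
      (fun acc i => if PySem.List.pyGetD dz (i + 1) 0 - PySem.List.pyGetD dz i 0 = 1 then acc + 1 else acc) 0
  [("soma", soma), ("qtd_pares", pares), ("qtd_impares", impares), ("qtd_sequencias", sequencias)]

-- ===== PORT B =====
def extrair_features_dezenas_alt (dezenas : List Int) : List (String × Int) :=
  let soma := dezenas.sum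
  let pares : Int := dezenas.countP (fun d => decide (PySem.Int.mod d 2 = 0))
  let impares : Int := (dezenas.length : Int) - pares
  let conjunto : PySem.Set Int := PySem.Set.ofList dezenas
  let sequencias : Int := conjunto.countP (fun d => decide ((d + 1) ∈ conjunto))
  [("soma", soma), ("qtd_pares", pares), ("qtd_impares", impares), ("qtd_sequencias", sequencias)]

-- ===== PRECONDITION & SPEC =====
def Spec_extrair_features_dezenas (dezenas : List Int) (out : List (String × Int)) : Prop := out = extrair_features_dezenas_alt dezenas
instance (dezenas : List Int) (out : List (String × Int)) : Decidable (Spec_extrair_features_dezenas dezenas out) := by unfold Spec_extrair_features_dezenas; infer_instance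

-- ===== CLAIM (what is proved, stated in full; the proofs are below) =====
def Claim_equal_extrair_features_dezenas : Prop := ∀ (dezenas : List Int), Dom_extrair_features_dezenas dezenas → Spec_extrair_features_dezenas dezenas (extrair_features_dezenas dezenas)

-- ===== LEMMAS AND PROOFS =====

-- A count over a duplicate-free list equals the cardinality of the corresponding Finset filter.
theorem countP_eq_card_filter_toFinset (l : List Int) (hl : l.Nodup) (p : Int → Bool) :
    l.countP p = (l.toFinset.filter (fun x => p x = true)).card := by
  rw [List.countP_eq_length_filter, ← List.toFinset_card_of_nodup (hl.filter p),
    List.toFinset_filter]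

-- The adjacency "difference exactly one" count of a sorted list, as a Finset cardinality.
theorem adj_count_sorted (s : List Int) (hs : s.Pairwise (· ≤ ·)) :
    (List.range (s.length - 1)).countP
        (fun k => decide (s.getD (k + 1) 0 - s.getD k 0 = 1))
      = (s.toFinset.filter (fun v => v + 1 ∈ s.toFinset)).card := by
  revert hs
  induction s with
  | nil => intro _; simp
  | cons a t ih =>
    intro hs
    cases t with
    | nil =>
      simp [Finset.filter_singleton]
    | cons b u =>
      rcases List.pairwise_cons.mp hs with ⟨ha, hbu⟩
      have hab : a ≤ b := ha b (by simp)
      have hbmin : ∀ x ∈ (b :: u), b ≤ x := by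
        intro x hx
        rcases List.mem_cons.mp hx with rfl | hx
        · exact le_refl _
        · exact (List.pairwise_cons.mp hbu).1 x hx
      have hlhs :
          (List.range ((a :: b :: u).length - 1)).countP
              (fun k => decide ((a :: b :: u).getD (k + 1) 0 - (a :: b :: u).getD k 0 = 1))
            = (List.range ((b :: u).length - 1)).countP
                (fun k => decide ((b :: u).getD (k + 1) 0 - (b :: u).getD k 0 = 1))
              + if b - a = 1 then 1 else 0 := by
        simp only [List.length_cons, Nat.add_sub_cancel, List.range_succ_eq_map,
          List.countP_cons, List.countP_map]
        simp
        apply List.countP_congr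
        intro x hx
        simp [Nat.succ_eq_add_one]
      rw [hlhs, ih hbu]
      rcases eq_or_lt_of_le hab with rfl | hlt
      · have hfs : (a :: a :: u).toFinset = (a :: u).toFinset := by simp
        rw [hfs]
        simp
      · -- a < b: the insert of a is fresh, and a's run indicator is exactly [b - a = 1]
        have hFmin : ∀ x ∈ (b :: u).toFinset, b ≤ x := by
          intro x hx; exact hbmin x (List.mem_toFinset.mp hx)
        have haF : a ∉ (b :: u).toFinset := by
          intro hx; exact absurd (hFmin a hx) (not_le.mpr hlt)
        have hfull : (a :: b :: u).toFinset = insert a (b :: u).toFinset := by simp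
        rw [hfull]
        have hcong : Finset.filter (fun v => v + 1 ∈ insert a (b :: u).toFinset)
              (insert a (b :: u).toFinset)
            = Finset.filter (fun v => v + 1 ∈ (b :: u).toFinset)
              (insert a (b :: u).toFinset) := by
          apply Finset.filter_congr
          intro x hx
          have hxa : a ≤ x := by
            rcases Finset.mem_insert.mp hx with rfl | hx
            · exact le_refl _
            · exact le_of_lt (lt_of_lt_of_le hlt (hFmin x hx))
          have : x + 1 ≠ a := by omega
          simp [Finset.mem_insert, this]
        rw [hcong, Finset.filter_insert]
        by_cases hmem : a + 1 ∈ (b :: u).toFinset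
        · have hb1 : b = a + 1 := le_antisymm (hFmin _ hmem) (by omega)
          have hanot : a ∉ Finset.filter (fun v => v + 1 ∈ (b :: u).toFinset) (b :: u).toFinset := by
            intro hx; exact haF (Finset.mem_filter.mp hx).1
          rw [if_pos hmem, Finset.card_insert_of_notMem hanot]
          simp [hb1]
        · have hb1 : b - a ≠ 1 := by
            intro h
            exact hmem (by
              have : b = a + 1 := by omega
              simp [← this])
          rw [if_neg hmem, if_neg hb1]
          simp

-- ===== VERDICT (by name: the statement is the Claim_ definition above) =====
theorem extrair_features_dezenas_spec : Claim_equal_extrair_features_dezenas := by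
  intro dezenas _
  unfold Spec_extrair_features_dezenas extrair_features_dezenas extrair_features_dezenas_alt
  have hperm : (PySem.List.sorted dezenas (fun x => x) false).Perm dezenas :=
    PySem.List.sorted_perm ..
  have hsorted : (PySem.List.sorted dezenas (fun x => x) false).Pairwise (· ≤ ·) := by
    simpa using PySem.List.sorted_pairwise (xs := dezenas) (key := fun x => x)
  set s := PySem.List.sorted dezenas (fun x => x) false with hsdef
  have hsum : s.sum = dezenas.sum := hperm.sum_eq
  have hlen : s.length = dezenas.length := hperm.length_eq
  have hpares : s.foldl (fun acc d => if PySem.Int.mod d 2 = 0 then acc + 1 else acc) 0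
      = (dezenas.countP (fun d => decide (PySem.Int.mod d 2 = 0)) : Int) := by
    rw [PySem.List.foldl_ite_add_one, hperm.countP_eq, zero_add]
  have hseq :
      (PySem.List.pyRange 0 ((s.length : Int) - 1) 1).foldl
          (fun acc i => if PySem.List.pyGetD s (i + 1) 0 - PySem.List.pyGetD s i 0 = 1 then acc + 1 else acc) 0
        = ((PySem.Set.ofList dezenas).countP
            (fun d => decide ((d + 1) ∈ PySem.Set.ofList dezenas)) : Int) := by
    rw [PySem.List.foldl_ite_add_one, zero_add, PySem.List.pyRange_one, List.countP_map]
    have hcnt : (List.range (((s.length : Int) - 1 - 0).toNat)).countP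
          ((fun i => decide (PySem.List.pyGetD s (i + 1) 0 - PySem.List.pyGetD s i 0 = 1)) ∘ (fun k : Nat => (0 : Int) + k))
        = (List.range (s.length - 1)).countP
          (fun k => decide (s.getD (k + 1) 0 - s.getD k 0 = 1)) := by
      have hn : ((s.length : Int) - 1 - 0).toNat = s.length - 1 := by omega
      rw [hn]
      apply List.countP_congr
      intro k _
      have h1 : (k : Int) + 1 = ((k + 1 : Nat) : Int) := by push_cast; ring
      simp only [Function.comp, zero_add, h1, PySem.List.pyGetD_natCast]
    rw [hcnt, adj_count_sorted s hsorted]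
    rw [countP_eq_card_filter_toFinset _ (PySem.Set.nodup_ofList dezenas)]
    have hts : s.toFinset = dezenas.toFinset := by
      apply Finset.ext
      intro x
      simp only [List.mem_toFinset]
      exact hperm.mem_iff
    have htc : (PySem.Set.ofList dezenas).toFinset = dezenas.toFinset := by
      apply Finset.ext
      intro x
      simp [List.mem_toFinset, PySem.Set.mem_ofList]
    congr 1
    rw [hts, htc]
    apply congrArg Finset.card
    apply Finset.filter_congr
    intro x _
    simp [PySem.Set.mem_ofList]
  simp only [hsum, hpares, hseq]
  rw [hlen]
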